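-- pv_equiv track=rewrite | github.com/da0ab/vim-caramel | scripts/div.py | wrap_in_paragraphs
-- ===== SOURCE A (Python) =====
-- def wrap_in_paragraphs(text):
--     lines = text.split('\n')
--     wrapped_text = []
--     current_paragraph = []
--
--     for line in lines:
--         stripped_line = line.strip()
--         if stripped_line:
--             current_paragraph.append(line)
--         else:
--             if current_paragraph:
--                 wrapped_text.append('<div>' + '\n'.join(current_paragraph) + '</div>')
--                 current_paragraph = []
--             wrapped_text.append('')
--
--     if current_paragraph:
--         wrapped_text.append('<div>' + '\n'.join(current_paragraph) + '</div>')
--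
--     return '\n'.join(wrapped_text)
-- ===== SOURCE B (Python) =====
-- def wrap_in_paragraphs(text):
--     lines = text.split('\n')
--     out = []
--     i = 0
--     n = len(lines)
--     while i < n:
--         if lines[i].strip():
--             j = i
--             while j < n and lines[j].strip():
--                 j += 1
--             out.append('<div>' + '\n'.join(lines[i:j]) + '</div>')
--             i = j
--         else:
--             out.append('')
--             i += 1
--     return '\n'.join(out)
-- ===== Notes on version B (the rewrite author's own statement) =====
-- stated objective: alternative
-- what changed: Replaces A's accumulator-and-flush (a growing current_paragraph buffer flushed on blank lines and at the end) with a two-pointer run scanner: an outer loop that, at each non-blank line, advances a second index to the end of the non-blank run and emits the wrapped slice at once, so no paragraph buffer or final flush exists.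
import Mathlib
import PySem

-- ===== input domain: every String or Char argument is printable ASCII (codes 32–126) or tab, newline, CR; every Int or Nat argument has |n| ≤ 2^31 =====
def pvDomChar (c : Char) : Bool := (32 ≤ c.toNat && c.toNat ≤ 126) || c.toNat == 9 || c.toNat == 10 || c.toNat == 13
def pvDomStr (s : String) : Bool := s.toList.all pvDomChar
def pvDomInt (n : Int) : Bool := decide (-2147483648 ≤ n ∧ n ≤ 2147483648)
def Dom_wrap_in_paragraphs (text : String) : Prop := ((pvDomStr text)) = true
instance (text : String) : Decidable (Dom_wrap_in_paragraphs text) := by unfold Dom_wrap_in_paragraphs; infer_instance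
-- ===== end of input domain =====

-- B replaces A's accumulator-and-flush with a two-pointer run scanner over the lines (alternative decomposition, same cost).


-- ===== PORT A =====
-- one step of A's for-loop: state = (wrapped_text, current_paragraph)
def pvAStep (st : List String × List String) (line : String) : List String × List String :=
  if PySem.Str.strip line ≠ "" then
    (st.1, st.2 ++ [line])
  else
    ((if st.2 ≠ [] then st.1 ++ ["<div>" ++ PySem.Str.join "\n" st.2 ++ "</div>"] else st.1) ++ [""], [])

def wrap_in_paragraphs (text : String) : String :=
  let lines := (PySem.Str.split? text "\n").getD []
  let st := lines.foldl pvAStep ([], [])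
  let wrapped := if st.2 ≠ [] then st.1 ++ ["<div>" ++ PySem.Str.join "\n" st.2 ++ "</div>"] else st.1
  PySem.Str.join "\n" wrapped

-- ===== PORT B =====
-- B's outer while loop: at a non-blank line the inner while advances to the end of the run
-- (= takeWhile/dropWhile of the non-blank predicate) and the wrapped slice is emitted at once.
def pvBGo : List String → List String
  | [] => []
  | l :: ls =>
    if PySem.Str.strip l ≠ "" then
      ("<div>" ++ PySem.Str.join "\n" (l :: ls.takeWhile (fun x => PySem.Str.strip x ≠ "")) ++ "</div>")
        :: pvBGo (ls.dropWhile (fun x => PySem.Str.strip x ≠ ""))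
    else
      "" :: pvBGo ls
  termination_by ls => ls.length
  decreasing_by
  · exact Nat.lt_succ_of_le (List.length_dropWhile_le _ _)
  · exact Nat.lt_succ_self _

def wrap_in_paragraphs_alt (text : String) : String :=
  PySem.Str.join "\n" (pvBGo ((PySem.Str.split? text "\n").getD []))

-- ===== PRECONDITION & SPEC =====
def Spec_wrap_in_paragraphs (text : String) (out : String) : Prop := out = wrap_in_paragraphs_alt text
instance (text : String) (out : String) : Decidable (Spec_wrap_in_paragraphs text out) := by unfold Spec_wrap_in_paragraphs; infer_instance

-- ===== CLAIM (what is proved, stated in full; the proofs are below) =====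
def Claim_equal_wrap_in_paragraphs : Prop := ∀ (text : String), Dom_wrap_in_paragraphs text → Spec_wrap_in_paragraphs text (wrap_in_paragraphs text)

-- ===== LEMMAS AND PROOFS =====

-- A's final flush as a function of the loop state
def pvFlush (st : List String × List String) : List String :=
  if st.2 ≠ [] then st.1 ++ ["<div>" ++ PySem.Str.join "\n" st.2 ++ "</div>"] else st.1

-- what pvBGo would compute continuing from a pending (possibly empty) paragraph buffer
def pvBCont (current : List String) (lines : List String) : List String :=
  if current = [] then pvBGo lines
  else ("<div>" ++ PySem.Str.join "\n" (current ++ lines.takeWhile (fun x => PySem.Str.strip x ≠ "")) ++ "</div>")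
        :: pvBGo (lines.dropWhile (fun x => PySem.Str.strip x ≠ ""))

lemma pvKey (lines : List String) : ∀ (wrapped current : List String),
    pvFlush (lines.foldl pvAStep (wrapped, current)) = wrapped ++ pvBCont current lines := by
  induction lines with
  | nil =>
    intro wrapped current
    by_cases hc : current = [] <;>
      simp [pvFlush, pvBCont, pvBGo, hc]
  | cons l ls ih =>
    intro wrapped current
    by_cases hl : PySem.Str.strip l ≠ ""
    · have hstep : pvAStep (wrapped, current) l = (wrapped, current ++ [l]) := by
        simp [pvAStep, hl]
      rw [List.foldl_cons, hstep, ih]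
      by_cases hc : current = []
      · subst hc; simp [pvBCont, pvBGo, hl]
      · simp [pvBCont, hc, hl]
    · simp only [ne_eq, not_not] at hl
      have hstep : pvAStep (wrapped, current) l =
          ((if current ≠ [] then wrapped ++ ["<div>" ++ PySem.Str.join "\n" current ++ "</div>"] else wrapped) ++ [""], []) := by
        simp [pvAStep, hl]
      rw [List.foldl_cons, hstep, ih]
      by_cases hc : current = []
      · subst hc; simp [pvBCont, pvBGo, hl]
      · simp [pvBCont, pvBGo, hc, hl]

-- ===== VERDICT (by name: the statement is the Claim_ definition above) =====
theorem wrap_in_paragraphs_spec : Claim_equal_wrap_in_paragraphs := by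
  intro text _
  unfold Spec_wrap_in_paragraphs wrap_in_paragraphs wrap_in_paragraphs_alt
  have h := pvKey ((PySem.Str.split? text "\n").getD []) [] []
  simp [pvBCont] at h
  simp only [pvFlush] at h
  simp [h]
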